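-- pv_equiv track=rewrite | github.com/DansonArnaud/Pieges-jeu-de-plateau--Python | main.py | verticale
-- ===== SOURCE A (Python) =====
-- def verticale(grille, direction, colonne):
--     """
--     Déplace les éléments d'une colonne vers le haut ou le bas.
--
--     Args:
--         grille (list): La grille à modifier.
--         direction (str): "b" pour bas, "h" pour haut.
--         colonne (int): Index de la colonne.
--
--     Returns:
--         list: La grille modifiée.
--
--     Doctests:
--     >>> grille = [[1, 2, 3],[4, 5, 6],[7, 8, 9]]
--     >>> verticale(grille, "h", 1)
--     [[1, 5, 3], [4, 8, 6], [7, 2, 9]]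
--     """
--     taille = len(grille)
--     dernier = grille[-1][colonne]
--     premier = grille[0][colonne]
--     if direction == "b":
--         for i in range(taille - 1, 0, -1):
--             grille[i][colonne] = grille[i - 1][colonne]
--         grille[0][colonne] = dernier
--     elif direction == "h":
--         for i in range(taille - 1):
--             grille[i][colonne] = grille[i + 1][colonne]
--         grille[-1][colonne] = premier
--     return grille
-- ===== SOURCE B (Python) =====
-- def verticale(grille, direction, colonne):
--     taille = len(grille)
--     col = [grille[i][colonne] for i in range(taille)]
--     if direction == "b":
--         new_col = col[-1:] + col[:-1]
--     elif direction == "h":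
--         new_col = col[1:] + col[:1]
--     else:
--         new_col = col
--     for i in range(taille):
--         grille[i][colonne] = new_col[i]
--     return grille
-- ===== Notes on version B (the rewrite author's own statement) =====
-- stated objective: simpler
-- what changed: Replaces A's two direction-specific in-place shift loops with saved corner values by an extract-column / rotate-by-slicing / uniform write-back decomposition.
-- outside the precondition, e.g. on verticale([[1], [], [2]], 'x', 0): A returns [[1], [], [2]], B raises IndexError
import Mathlib
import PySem

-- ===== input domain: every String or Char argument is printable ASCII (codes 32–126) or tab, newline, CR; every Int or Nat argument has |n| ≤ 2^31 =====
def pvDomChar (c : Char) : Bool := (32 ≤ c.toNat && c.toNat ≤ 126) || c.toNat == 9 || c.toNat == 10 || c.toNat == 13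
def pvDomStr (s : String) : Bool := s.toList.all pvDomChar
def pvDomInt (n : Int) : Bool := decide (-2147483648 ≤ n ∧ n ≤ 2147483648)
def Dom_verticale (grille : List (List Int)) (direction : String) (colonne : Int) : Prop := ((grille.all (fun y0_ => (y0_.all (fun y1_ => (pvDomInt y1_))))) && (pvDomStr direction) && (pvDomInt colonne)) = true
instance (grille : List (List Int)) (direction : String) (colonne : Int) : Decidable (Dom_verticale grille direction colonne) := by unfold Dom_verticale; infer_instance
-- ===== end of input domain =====

-- B replaces A's direction-specific in-place shift loops by extract-column / rotate-by-slicing /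
-- uniform write-back (objective: simpler). A mutates grille in place; the equivalence proved here
-- is about the RETURN value only.


-- ===== PORT A =====
def verticale (grille : List (List Int)) (direction : String) (colonne : Int) : List (List Int) :=
  let taille : Int := grille.length
  let dernier : Int := PySem.List.pyGetD (PySem.List.pyGetD grille (-1) []) colonne 0
  let premier : Int := PySem.List.pyGetD (PySem.List.pyGetD grille 0 []) colonne 0
  if direction == "b" then
    let g := (PySem.List.pyRange (taille - 1) 0 (-1)).foldl
      (fun g i => PySem.List.pySetD g i
        (PySem.List.pySetD (PySem.List.pyGetD g i []) colonne
          (PySem.List.pyGetD (PySem.List.pyGetD g (i - 1) []) colonne 0))) grille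
    PySem.List.pySetD g 0 (PySem.List.pySetD (PySem.List.pyGetD g 0 []) colonne dernier)
  else if direction == "h" then
    let g := (PySem.List.pyRange 0 (taille - 1) 1).foldl
      (fun g i => PySem.List.pySetD g i
        (PySem.List.pySetD (PySem.List.pyGetD g i []) colonne
          (PySem.List.pyGetD (PySem.List.pyGetD g (i + 1) []) colonne 0))) grille
    PySem.List.pySetD g (-1) (PySem.List.pySetD (PySem.List.pyGetD g (-1) []) colonne premier)
  else grille

-- ===== PORT B =====
def verticale_alt (grille : List (List Int)) (direction : String) (colonne : Int) : List (List Int) :=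
  let taille : Int := grille.length
  let col : List Int := (PySem.List.pyRange 0 taille 1).map
    (fun i => PySem.List.pyGetD (PySem.List.pyGetD grille i []) colonne 0)
  let newCol : List Int :=
    if direction == "b" then
      PySem.List.slice col (some (-1)) none ++ PySem.List.slice col none (some (-1))
    else if direction == "h" then
      PySem.List.slice col (some 1) none ++ PySem.List.slice col none (some 1)
    else col
  (PySem.List.pyRange 0 taille 1).foldl
    (fun g i => PySem.List.pySetD g i
      (PySem.List.pySetD (PySem.List.pyGetD g i []) colonne (PySem.List.pyGetD newCol i 0))) grille

-- ===== PRECONDITION & SPEC =====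
-- Pre_ excludes the empty grid and grids where colonne is out of Python range for some row: on the
-- empty grid and for directions "b"/"h" (or an out-of-range first/last row) A raises IndexError
-- there, and for other directions A returns the grid with untouched out-of-range middle rows while
-- B, which reads the whole column, raises.
def Pre_verticale (grille : List (List Int)) (direction : String) (colonne : Int) : Prop :=
  grille ≠ [] ∧ ∀ row ∈ grille, PySem.Raise.InRange row.length colonne
instance (grille : List (List Int)) (direction : String) (colonne : Int) : Decidable (Pre_verticale grille direction colonne) := by unfold Pre_verticale; infer_instance

def pvWitness_verticale : List (List Int) × String × Int := ([[1, 2], [3, 4], [5, 6]], "h", 0)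

def Spec_verticale (grille : List (List Int)) (direction : String) (colonne : Int) (out : List (List Int)) : Prop := out = verticale_alt grille direction colonne
instance (grille : List (List Int)) (direction : String) (colonne : Int) (out : List (List Int)) : Decidable (Spec_verticale grille direction colonne out) := by unfold Spec_verticale; infer_instance

-- ===== CLAIM (what is proved, stated in full; the proofs are below) =====
def Claim_equal_verticale : Prop := ∀ (grille : List (List Int)) (direction : String) (colonne : Int), Dom_verticale grille direction colonne → Pre_verticale grille direction colonne → Spec_verticale grille direction colonne (verticale grille direction colonne)

-- ===== LEMMAS AND PROOFS =====

-- every loop in either port only writes rows via pySetD, so the grid's length is preserved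
theorem pv_length_foldl_pySetD (F : List (List Int) → Int → List Int) :
    ∀ (is : List Int) (g : List (List Int)),
      (is.foldl (fun g i => PySem.List.pySetD g i (F g i)) g).length = g.length := by
  intro is
  induction is with
  | nil => intro g; rfl
  | cons i is ih =>
      intro g
      simp only [List.foldl_cons]
      rw [ih]
      simp only [PySem.List.pySetD, PySem.List.pySet?]
      cases h : PySem.List.pyIdx? g.length i <;> simp

theorem pv_pySetD_pyGetD_self (xs : List Int) (i : Int)
    (h : PySem.Raise.InRange xs.length i) :
    PySem.List.pySetD xs i (PySem.List.pyGetD xs i 0) = xs := by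
  obtain ⟨h1, h2⟩ := h
  simp only [PySem.List.pySetD, PySem.List.pySet?, PySem.List.pyGetD, PySem.List.pyGet?,
    PySem.List.pyIdx?]
  by_cases h0 : 0 ≤ i
  · simp only [h0, if_pos, if_pos h2]
    simp only [Option.map_some, Option.bind_some, Option.getD_some]
    have hk : i.toNat < xs.length := by omega
    simp [List.getElem?_eq_getElem hk, List.set_getElem_self]
  · simp only [h0, if_pos h1]
    have hk : xs.length - (-i).toNat < xs.length := by omega
    simp [List.getElem?_eq_getElem hk, List.set_getElem_self]

theorem pv_pyGetD_neg_one' {α : Type} (xs : List α) (d : α) (h : 0 < xs.length) :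
    PySem.List.pyGetD xs (-1) d = xs.getD (xs.length - 1) d := by
  simp only [PySem.List.pyGetD, PySem.List.pyGet?, PySem.List.pyIdx?]
  rw [if_neg (by norm_num), if_pos (by omega : -(xs.length : Int) ≤ -1)]
  simp [List.getD_eq_getElem?_getD]

theorem pv_pySetD_neg_one {α : Type} (xs : List α) (v : α) (h : 0 < xs.length) :
    PySem.List.pySetD xs (-1) v = xs.set (xs.length - 1) v := by
  simp only [PySem.List.pySetD, PySem.List.pySet?, PySem.List.pyIdx?]
  rw [if_neg (by norm_num), if_pos (by omega : -(xs.length : Int) ≤ -1)]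
  simp

theorem pv_pySetD_zero {α : Type} (xs : List α) (v : α) :
    PySem.List.pySetD xs 0 v = xs.set 0 v := by
  rw [PySem.List.pySetD_of_nonneg _ _ (by norm_num : (0:Int) ≤ 0)]
  norm_num

theorem pv_ascH (colonne : Int) :
    ∀ (m : Nat) (g : List (List Int)) (j : Nat),
      ((PySem.List.pyRange 0 (m : Int) 1).foldl
        (fun g i => PySem.List.pySetD g i
          (PySem.List.pySetD (PySem.List.pyGetD g i []) colonne
            (PySem.List.pyGetD (PySem.List.pyGetD g (i + 1) []) colonne 0))) g)[j]?
      = if j < m ∧ j < g.length then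
          some (PySem.List.pySetD (g.getD j []) colonne
            (PySem.List.pyGetD (g.getD (j + 1) []) colonne 0))
        else g[j]? := by
  intro m
  induction m with
  | zero =>
      intro g j
      simp [PySem.List.pyRange_one_eq_nil]
  | succ m ih =>
      intro g j
      have hcast : ((m + 1 : Nat) : Int) = (m : Int) + 1 := by push_cast; ring
      rw [hcast, PySem.List.pyRange_one_succ_right (by positivity), List.foldl_append]
      simp only [List.foldl_cons, List.foldl_nil]
      have hlen : ((PySem.List.pyRange 0 (m : Int) 1).foldl
          (fun g i => PySem.List.pySetD g i
            (PySem.List.pySetD (PySem.List.pyGetD g i []) colonne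
              (PySem.List.pyGetD (PySem.List.pyGetD g (i + 1) []) colonne 0))) g).length = g.length :=
        pv_length_foldl_pySetD _ _ _
      set L := (PySem.List.pyRange 0 (m : Int) 1).foldl
          (fun g i => PySem.List.pySetD g i
            (PySem.List.pySetD (PySem.List.pyGetD g i []) colonne
              (PySem.List.pyGetD (PySem.List.pyGetD g (i + 1) []) colonne 0))) g with hL
      have hread : PySem.List.pyGetD L (m : Int) [] = g.getD m [] := by
        have := ih g m
        simp only [lt_irrefl, false_and, if_neg, not_false_iff] at this
        rw [PySem.List.pyGetD_natCast, List.getD_eq_getElem?_getD, List.getD_eq_getElem?_getD]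
        rw [this]
      have hread2 : PySem.List.pyGetD L ((m : Int) + 1) [] = g.getD (m + 1) [] := by
        have h1 : ((m : Int) + 1) = ((m + 1 : Nat) : Int) := by push_cast; ring
        have := ih g (m + 1)
        simp only [show ¬(m + 1 < m ∧ m + 1 < g.length) by omega, if_neg, not_false_iff] at this
        rw [h1, PySem.List.pyGetD_natCast, List.getD_eq_getElem?_getD, List.getD_eq_getElem?_getD]
        rw [this]
      rw [hread, hread2, PySem.List.pySetD_of_nonneg _ _ (by positivity), Int.toNat_natCast]
      rw [List.getElem?_set, ih g j]
      by_cases hmj : m = j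
      · subst hmj
        rw [hlen]
        by_cases hlt : m < g.length
        · simp [hlt, show m < m + 1 ∧ m < g.length by omega]
        · simp [hlt]
      · simp only [hmj, if_false]
        by_cases hc : j < m ∧ j < g.length
        · rw [if_pos hc, if_pos (show j < m + 1 ∧ j < g.length by omega)]
        · by_cases hc2 : j < m + 1 ∧ j < g.length
          · exfalso; omega
          · rw [if_neg hc, if_neg hc2]

theorem pv_wb (colonne : Int) (c : List Int) :
    ∀ (m : Nat) (g : List (List Int)) (j : Nat),
      ((PySem.List.pyRange 0 (m : Int) 1).foldl
        (fun g i => PySem.List.pySetD g i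
          (PySem.List.pySetD (PySem.List.pyGetD g i []) colonne
            (PySem.List.pyGetD c i 0))) g)[j]?
      = if j < m ∧ j < g.length then
          some (PySem.List.pySetD (g.getD j []) colonne (PySem.List.pyGetD c (j : Int) 0))
        else g[j]? := by
  intro m
  induction m with
  | zero =>
      intro g j
      simp [PySem.List.pyRange_one_eq_nil]
  | succ m ih =>
      intro g j
      have hcast : ((m + 1 : Nat) : Int) = (m : Int) + 1 := by push_cast; ring
      rw [hcast, PySem.List.pyRange_one_succ_right (by positivity), List.foldl_append]
      simp only [List.foldl_cons, List.foldl_nil]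
      have hlen : ((PySem.List.pyRange 0 (m : Int) 1).foldl
          (fun g i => PySem.List.pySetD g i
            (PySem.List.pySetD (PySem.List.pyGetD g i []) colonne
              (PySem.List.pyGetD c i 0))) g).length = g.length :=
        pv_length_foldl_pySetD _ _ _
      set L := (PySem.List.pyRange 0 (m : Int) 1).foldl
          (fun g i => PySem.List.pySetD g i
            (PySem.List.pySetD (PySem.List.pyGetD g i []) colonne
              (PySem.List.pyGetD c i 0))) g with hL
      have hread : PySem.List.pyGetD L (m : Int) [] = g.getD m [] := by
        have := ih g m
        simp only [lt_irrefl, false_and, if_neg, not_false_iff] at this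
        rw [PySem.List.pyGetD_natCast, List.getD_eq_getElem?_getD, List.getD_eq_getElem?_getD]
        rw [this]
      rw [PySem.List.pySetD_of_nonneg _ _ (by positivity), hread, Int.toNat_natCast]
      rw [List.getElem?_set, ih g j]
      by_cases hmj : m = j
      · subst hmj
        rw [hlen]
        by_cases hlt : m < g.length
        · simp [hlt, show m < m + 1 ∧ m < g.length by omega]
        · simp [hlt]
      · simp only [hmj, if_false]
        by_cases hc : j < m ∧ j < g.length
        · rw [if_pos hc, if_pos (show j < m + 1 ∧ j < g.length by omega)]
        · by_cases hc2 : j < m + 1 ∧ j < g.length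
          · exfalso; omega
          · rw [if_neg hc, if_neg hc2]

theorem pv_descB (colonne : Int) :
    ∀ (k : Nat) (g : List (List Int)) (j : Nat),
      ((PySem.List.pyRange (k : Int) 0 (-1)).foldl
        (fun g i => PySem.List.pySetD g i
          (PySem.List.pySetD (PySem.List.pyGetD g i []) colonne
            (PySem.List.pyGetD (PySem.List.pyGetD g (i - 1) []) colonne 0))) g)[j]?
      = if 1 ≤ j ∧ j ≤ k ∧ j < g.length then
          some (PySem.List.pySetD (g.getD j []) colonne
            (PySem.List.pyGetD (g.getD (j - 1) []) colonne 0))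
        else g[j]? := by
  intro k
  induction k with
  | zero =>
      intro g j
      rw [PySem.List.pyRange_neg_one_eq_nil (by norm_num)]
      simp only [List.foldl_nil]
      rw [if_neg (by omega)]
  | succ k ih =>
      intro g j
      have hcast : ((k + 1 : Nat) : Int) = (k : Int) + 1 := by push_cast; ring
      rw [hcast, PySem.List.pyRange_neg_one_cons (by positivity)]
      simp only [List.foldl_cons]
      have hsub : (k : Int) + 1 - 1 = (k : Int) := by ring
      rw [hsub]
      rw [show ((k : Int) + 1) = ((k + 1 : Nat) : Int) by push_cast; ring]
      rw [PySem.List.pySetD_of_nonneg _ _ (by positivity), Int.toNat_natCast,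
          PySem.List.pyGetD_natCast, PySem.List.pyGetD_natCast]
      set g' := g.set (k + 1) (PySem.List.pySetD (g.getD (k + 1) []) colonne
        (PySem.List.pyGetD (g.getD k []) colonne 0)) with hg'
      rw [ih g' j]
      have hlen' : g'.length = g.length := by rw [hg', List.length_set]
      by_cases hc : 1 ≤ j ∧ j ≤ k ∧ j < g.length
      · rw [if_pos (by omega : 1 ≤ j ∧ j ≤ k ∧ j < g'.length),
            if_pos (by omega : 1 ≤ j ∧ j ≤ k + 1 ∧ j < g.length)]
        have e1 : g'.getD j [] = g.getD j [] := by
          rw [hg', List.getD_eq_getElem?_getD, List.getD_eq_getElem?_getD,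
              List.getElem?_set, if_neg (by omega), ← List.getD_eq_getElem?_getD]
        have e2 : g'.getD (j - 1) [] = g.getD (j - 1) [] := by
          rw [hg', List.getD_eq_getElem?_getD, List.getD_eq_getElem?_getD,
              List.getElem?_set, if_neg (by omega), ← List.getD_eq_getElem?_getD]
        rw [e1, e2]
      · rw [if_neg (by omega : ¬(1 ≤ j ∧ j ≤ k ∧ j < g'.length))]
        rw [hg', List.getElem?_set]
        by_cases hj : k + 1 = j
        · subst hj
          by_cases hlt : k + 1 < g.length
          · rw [if_pos rfl, if_pos hlt,
                if_pos (show 1 ≤ k + 1 ∧ k + 1 ≤ k + 1 ∧ k + 1 < g.length by omega)]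
            rw [show k + 1 - 1 = k by omega]
          · rw [if_pos rfl, if_neg hlt, if_neg (by omega),
                List.getElem?_eq_none_iff.mpr (by omega)]
        · rw [if_neg hj, if_neg (by omega)]

-- ===== VERDICT (by name: the statement is the Claim_ definition above) =====
theorem verticale_spec : Claim_equal_verticale := by
  intro grille direction colonne _hdom hpre
  show verticale grille direction colonne = verticale_alt grille direction colonne
  obtain ⟨hne, hrows⟩ := hpre
  have hn : 0 < grille.length := List.length_pos_of_ne_nil hne
  simp only [verticale, verticale_alt]
  have hcol : ∀ m : Nat, m < grille.length →
      ((PySem.List.pyRange 0 (grille.length : Int) 1).map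
        (fun i => PySem.List.pyGetD (PySem.List.pyGetD grille i []) colonne 0))[m]?
      = some (PySem.List.pyGetD (grille.getD m []) colonne 0) := by
    intro m hm
    rw [PySem.List.getElem?_map_pyRange_zero _ grille.length m hm, PySem.List.pyGetD_natCast]
  set col := (PySem.List.pyRange 0 (grille.length : Int) 1).map
    (fun i => PySem.List.pyGetD (PySem.List.pyGetD grille i []) colonne 0) with hcoldef
  have hcollen : col.length = grille.length := by
    rw [hcoldef, List.length_map, PySem.List.length_pyRange_one]
    omega
  by_cases hb : (direction == "b") = true
  · rw [if_pos hb, if_pos hb]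
    apply List.ext_getElem?
    intro j
    rw [show (grille.length : Int) - 1 = ((grille.length - 1 : Nat) : Int) by omega]
    set gA := (PySem.List.pyRange ((grille.length - 1 : Nat) : Int) 0 (-1)).foldl
      (fun g i => PySem.List.pySetD g i
        (PySem.List.pySetD (PySem.List.pyGetD g i []) colonne
          (PySem.List.pyGetD (PySem.List.pyGetD g (i - 1) []) colonne 0))) grille with hgA
    have hA := pv_descB colonne (grille.length - 1) grille
    have hlenA : gA.length = grille.length := pv_length_foldl_pySetD _ _ _
    have hg0 : PySem.List.pyGetD gA 0 [] = grille.getD 0 [] := by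
      rw [PySem.List.pyGetD_zero, List.getD_eq_getElem?_getD, hA 0, if_neg (by omega),
          ← List.getD_eq_getElem?_getD]
    rw [pv_pySetD_zero, List.getElem?_set, hg0, hA j]
    rw [pv_pyGetD_neg_one' _ _ hn]
    rw [pv_wb colonne _ grille.length grille j]
    rw [PySem.List.slice_from_neg_one, PySem.List.slice_to_neg_one]
    have hdroplen : (List.drop (col.length - 1) col).length = 1 := by
      rw [List.length_drop]; omega
    have hB0 : PySem.List.pyGetD (List.drop (col.length - 1) col ++ col.dropLast)
        ((0 : Nat) : Int) 0 = PySem.List.pyGetD (grille.getD (grille.length - 1) []) colonne 0 := by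
      rw [PySem.List.pyGetD_natCast, List.getD_eq_getElem?_getD,
          List.getElem?_append_left (by omega), List.getElem?_drop,
          show col.length - 1 + 0 = grille.length - 1 by omega,
          hcol (grille.length - 1) (by omega)]
      rfl
    have hBj : ∀ j : Nat, 1 ≤ j → j < grille.length →
        PySem.List.pyGetD (List.drop (col.length - 1) col ++ col.dropLast) (j : Int) 0
        = PySem.List.pyGetD (grille.getD (j - 1) []) colonne 0 := by
      intro j h1 h2
      rw [PySem.List.pyGetD_natCast, List.getD_eq_getElem?_getD,
          List.getElem?_append_right (by omega), hdroplen, List.getElem?_dropLast,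
          if_pos (by omega), hcol (j - 1) (by omega)]
      rfl
    by_cases hj0 : j = 0
    · subst hj0
      rw [if_pos rfl, if_pos (show (0:Nat) < gA.length by omega),
          if_pos (show 0 < grille.length ∧ 0 < grille.length by omega), hB0]
    · rw [if_neg (fun h => hj0 h.symm)]
      by_cases hjn : j < grille.length
      · rw [if_pos (show 1 ≤ j ∧ j ≤ grille.length - 1 ∧ j < grille.length by omega),
            if_pos (show j < grille.length ∧ j < grille.length by omega),
            hBj j (by omega) hjn]
      · rw [if_neg (by omega), if_neg (by omega)]
  · rw [if_neg hb, if_neg hb]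
    by_cases hh : (direction == "h") = true
    · rw [if_pos hh, if_pos hh]
      apply List.ext_getElem?
      intro j
      rw [show (grille.length : Int) - 1 = ((grille.length - 1 : Nat) : Int) by omega]
      set gA := (PySem.List.pyRange 0 ((grille.length - 1 : Nat) : Int) 1).foldl
        (fun g i => PySem.List.pySetD g i
          (PySem.List.pySetD (PySem.List.pyGetD g i []) colonne
            (PySem.List.pyGetD (PySem.List.pyGetD g (i + 1) []) colonne 0))) grille with hgA
      have hA := pv_ascH colonne (grille.length - 1) grille
      have hlenA : gA.length = grille.length := pv_length_foldl_pySetD _ _ _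
      have hglast : PySem.List.pyGetD gA (-1) [] = grille.getD (grille.length - 1) [] := by
        rw [pv_pyGetD_neg_one' _ _ (by omega), hlenA, List.getD_eq_getElem?_getD,
            hA (grille.length - 1), if_neg (by omega), ← List.getD_eq_getElem?_getD]
      rw [pv_pySetD_neg_one _ _ (by omega), hlenA, List.getElem?_set, hglast, hA j]
      rw [PySem.List.pyGetD_zero]
      rw [pv_wb colonne _ grille.length grille j]
      rw [PySem.List.slice_from_one,
          show PySem.List.slice col none (some 1) = List.take 1 col by
            rw [PySem.List.slice_to col (by norm_num)]; norm_num]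
      have htaillen : col.tail.length = grille.length - 1 := by
        rw [List.length_tail]; omega
      have hClast : PySem.List.pyGetD (col.tail ++ List.take 1 col)
          ((grille.length - 1 : Nat) : Int) 0
          = PySem.List.pyGetD (grille.getD 0 []) colonne 0 := by
        rw [PySem.List.pyGetD_natCast, List.getD_eq_getElem?_getD,
            List.getElem?_append_right (by omega), htaillen,
            show grille.length - 1 - (grille.length - 1) = 0 by omega,
            List.getElem?_take, if_pos (by norm_num), hcol 0 (by omega)]
        rfl
      have hCj : ∀ j : Nat, j < grille.length - 1 →
          PySem.List.pyGetD (col.tail ++ List.take 1 col) (j : Int) 0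
          = PySem.List.pyGetD (grille.getD (j + 1) []) colonne 0 := by
        intro j hj
        rw [PySem.List.pyGetD_natCast, List.getD_eq_getElem?_getD,
            List.getElem?_append_left (by omega), List.getElem?_tail,
            hcol (j + 1) (by omega)]
        rfl
      by_cases hjl : grille.length - 1 = j
      · subst hjl
        rw [if_pos rfl, if_pos (show grille.length - 1 < gA.length by omega),
            if_pos (show grille.length - 1 < grille.length ∧ grille.length - 1 < grille.length by omega),
            hClast]
      · rw [if_neg hjl]
        by_cases hjn : j < grille.length - 1
        · rw [if_pos (show j < grille.length - 1 ∧ j < grille.length by omega),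
              if_pos (show j < grille.length ∧ j < grille.length by omega), hCj j hjn]
        · rw [if_neg (by omega), if_neg (by omega)]
    · rw [if_neg hh, if_neg hh]
      apply List.ext_getElem?
      intro j
      rw [pv_wb colonne _ grille.length grille j]
      by_cases hjn : j < grille.length
      · have hcolread : PySem.List.pyGetD col (j : Int) 0
            = PySem.List.pyGetD (grille.getD j []) colonne 0 := by
          rw [PySem.List.pyGetD_natCast, List.getD_eq_getElem?_getD (l := col) (i := j) (a := 0),
              hcol j hjn]
          rfl
        have hmem : grille.getD j [] ∈ grille := by
          rw [List.getD_eq_getElem _ _ hjn]; exact List.getElem_mem hjn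
        rw [if_pos (by omega), hcolread, pv_pySetD_pyGetD_self _ _ (hrows _ hmem),
            List.getElem?_eq_getElem hjn, List.getD_eq_getElem _ _ hjn]
      · rw [if_neg (by omega)]
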